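-- pv_equiv track=rewrite | github.com/pypi-data/pypi-mirror-346 | packages/hatch-vcs-tunable/hatch_vcs_tunable-0.0.1a3-py3-none-any.whl/hatch_vcs_tunable/version_source.py | _collapse_semis
-- ===== SOURCE A (Python) =====
-- from collections import deque
-- from typing import Iterable
--
-- def _collapse_semis(parts: Iterable[str]) -> list[str]:
--     ret: list[list[str]] = []
--     remaining = deque(parts)
--     try:
--         ret.append([remaining.popleft()])
--     except IndexError:
--         return []
--     while remaining:
--         try:
--             top = remaining.popleft()
--             if "=" not in top:
--                 ret[-1].append(top)
--             else:
--                 ret.append([top])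
--         except IndexError:
--             break
--     return [";".join(parts) for parts in ret]
-- ===== SOURCE B (Python) =====
-- def _collapse_semis(parts):
--     # Single backward pass: an element containing '=' closes the group it starts;
--     # whatever is left at the end is the group led by the first element.
--     groups = []
--     cur = []  # current group, collected back-to-front
--     for x in reversed(list(parts)):
--         cur.append(x)
--         if "=" in x:
--             cur.reverse()
--             groups.append(";".join(cur))
--             cur = []
--     if cur:
--         cur.reverse()
--         groups.append(";".join(cur))
--     groups.reverse()
--     return groups
-- ===== Notes on version B (the rewrite author's own statement) =====
-- stated objective: alternative
-- what changed: Replaces A's forward deque loop that appends each element onto the current last group with a single backward pass that closes a joined group whenever it meets an '='-marked element and flushes the leftover as the first group; no deque, no try/except, no list-of-lists result kept to the end.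
import Mathlib
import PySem

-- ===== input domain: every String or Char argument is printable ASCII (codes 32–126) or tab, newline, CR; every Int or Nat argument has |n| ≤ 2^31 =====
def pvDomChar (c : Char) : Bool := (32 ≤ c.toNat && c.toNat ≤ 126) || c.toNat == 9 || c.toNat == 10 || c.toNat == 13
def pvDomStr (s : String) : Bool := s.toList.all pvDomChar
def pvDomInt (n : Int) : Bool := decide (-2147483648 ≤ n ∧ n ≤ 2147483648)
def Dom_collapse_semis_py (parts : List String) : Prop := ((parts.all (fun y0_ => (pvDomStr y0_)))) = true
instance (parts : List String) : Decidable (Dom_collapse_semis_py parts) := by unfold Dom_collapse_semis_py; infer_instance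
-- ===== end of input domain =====

-- B replaces A's forward deque loop by a single backward pass that decides group
-- membership from the following group's first element (objective: alternative decomposition).

-- ===== PORT A =====
-- ret[-1].append(top): modify the last group in place (ret is always nonempty when called)
def pvAppendLast : List (List String) → String → List (List String)
  | [], _ => []
  | g :: rest, x => if rest.isEmpty then [g ++ [x]] else g :: pvAppendLast rest x

-- the 'while remaining' loop of A (the inner IndexError branch is unreachable:
-- the loop body pops only after the emptiness test)
def pvLoopA : List String → List (List String) → List (List String)
  | [], ret => ret
  | top :: rem, ret =>
    if ¬ PySem.Str.isIn "=" top then pvLoopA rem (pvAppendLast ret top)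
    else pvLoopA rem (ret ++ [[top]])

def collapse_semis_py (parts : List String) : List String :=
  match parts with
  | [] => []                    -- popleft on empty deque: 'except IndexError: return []'
  | p :: rest => (pvLoopA rest [[p]]).map (fun g => PySem.Str.join ";" g)

-- ===== PORT B =====
-- one step of B's backward loop; state = (groups, cur), cur collected back-to-front
def pvStepB (x : String) (st : List String × List String) : List String × List String :=
  let cur := st.2 ++ [x]
  if PySem.Str.isIn "=" x then (st.1 ++ [PySem.Str.join ";" cur.reverse], [])
  else (st.1, cur)

def collapse_semis_py_alt (parts : List String) : List String :=
  let st := parts.foldr pvStepB ([], [])      -- 'for x in reversed(list(parts))'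
  let groups := if st.2.isEmpty then st.1
                else st.1 ++ [PySem.Str.join ";" st.2.reverse]   -- 'if cur: …'
  groups.reverse

-- ===== PRECONDITION & SPEC =====
def Spec_collapse_semis_py (parts : List String) (out : List String) : Prop := out = collapse_semis_py_alt parts
instance (parts : List String) (out : List String) : Decidable (Spec_collapse_semis_py parts out) := by unfold Spec_collapse_semis_py; infer_instance

-- ===== CLAIM (what is proved, stated in full; the proofs are below) =====
def Claim_equal_collapse_semis_py : Prop := ∀ (parts : List String), Dom_collapse_semis_py parts → Spec_collapse_semis_py parts (collapse_semis_py parts)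

-- ===== LEMMAS AND PROOFS =====

-- canonical left-to-right grouping with the current (nonempty) group as state
def pvGo : List String → List String → List (List String)
  | [], cur => [cur]
  | t :: r, cur => if PySem.Str.isIn "=" t then cur :: pvGo r [t] else pvGo r (cur ++ [t])

-- (prefix before the first '='-marked element, marker-led groups of the remainder)
def pvH : List String → List String × List (List String)
  | [] => ([], [])
  | x :: r =>
    if PySem.Str.isIn "=" x then ([], (x :: (pvH r).1) :: (pvH r).2)
    else (x :: (pvH r).1, (pvH r).2)

theorem pvGo_pos (s : String) (r : List String) (cur : List String)
    (hs : PySem.Str.isIn "=" s = true) : pvGo (s :: r) cur = cur :: pvGo r [s] := by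
  simp only [pvGo]; rw [if_pos hs]

theorem pvGo_neg (s : String) (r : List String) (cur : List String)
    (hs : PySem.Str.isIn "=" s = false) : pvGo (s :: r) cur = pvGo r (cur ++ [s]) := by
  simp only [pvGo]; rw [if_neg (by rw [hs]; simp)]

theorem pvH_pos (x : String) (r : List String) (hx : PySem.Str.isIn "=" x = true) :
    pvH (x :: r) = ([], (x :: (pvH r).1) :: (pvH r).2) := by
  simp only [pvH]; rw [if_pos hx]

theorem pvH_neg (x : String) (r : List String) (hx : PySem.Str.isIn "=" x = false) :
    pvH (x :: r) = (x :: (pvH r).1, (pvH r).2) := by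
  simp only [pvH]; rw [if_neg (by rw [hx]; simp)]

theorem pvLoopA_pos (top : String) (r : List String) (ret : List (List String))
    (h : PySem.Str.isIn "=" top = true) :
    pvLoopA (top :: r) ret = pvLoopA r (ret ++ [[top]]) := by
  simp only [pvLoopA]; rw [if_neg (by rw [h]; simp)]

theorem pvLoopA_neg (top : String) (r : List String) (ret : List (List String))
    (h : PySem.Str.isIn "=" top = false) :
    pvLoopA (top :: r) ret = pvLoopA r (pvAppendLast ret top) := by
  simp only [pvLoopA]; rw [if_pos (by rw [h]; simp)]

theorem pvAppendLast_append (acc : List (List String)) (cur : List String) (x : String) :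
    pvAppendLast (acc ++ [cur]) x = acc ++ [cur ++ [x]] := by
  induction acc with
  | nil => simp [pvAppendLast]
  | cons a acc ih => simp [pvAppendLast, ih]

theorem pvLoopA_go (rem : List String) : ∀ (acc : List (List String)) (cur : List String),
    pvLoopA rem (acc ++ [cur]) = acc ++ pvGo rem cur := by
  induction rem with
  | nil => intro acc cur; simp [pvLoopA, pvGo]
  | cons top r ih =>
    intro acc cur
    rcases h : PySem.Str.isIn "=" top with _ | _
    · rw [pvLoopA_neg top r _ h, pvGo_neg top r cur h, pvAppendLast_append, ih acc (cur ++ [top])]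
    · rw [pvLoopA_pos top r _ h, pvGo_pos top r cur h,
        ih (acc ++ [cur]) [top], List.append_assoc]
      rfl

theorem pvGo_pvH (rest : List String) : ∀ (cur : List String),
    pvGo rest cur = (cur ++ (pvH rest).1) :: (pvH rest).2 := by
  induction rest with
  | nil => intro cur; simp [pvGo, pvH]
  | cons q r ih =>
    intro cur
    rcases h : PySem.Str.isIn "=" q with _ | _
    · rw [pvGo_neg q r cur h, pvH_neg q r h, ih (cur ++ [q])]
      simp
    · rw [pvGo_pos q r cur h, pvH_pos q r h, ih [q]]
      simp

theorem pvFoldrB_pvH (L : List String) :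
    L.foldr pvStepB ([], []) =
      (((pvH L).2.map (fun g => PySem.Str.join ";" g)).reverse, (pvH L).1.reverse) := by
  induction L with
  | nil => simp [pvH]
  | cons x r ih =>
    show pvStepB x (r.foldr pvStepB ([], [])) = _
    rw [ih]
    rcases h : PySem.Str.isIn "=" x with _ | _
    · rw [pvH_neg x r h]
      simp only [pvStepB]
      rw [if_neg (by rw [h]; simp)]
      simp
    · rw [pvH_pos x r h]
      simp only [pvStepB]
      rw [if_pos h]
      simp

-- ===== VERDICT (by name: the statement is the Claim_ definition above) =====
theorem collapse_semis_py_spec : Claim_equal_collapse_semis_py := by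
  intro parts _
  unfold Spec_collapse_semis_py
  match parts with
  | [] => rfl
  | p :: rest =>
    show (pvLoopA rest [[p]]).map (fun g => PySem.Str.join ";" g)
        = collapse_semis_py_alt (p :: rest)
    rw [show ([[p]] : List (List String)) = [] ++ [[p]] from rfl,
      pvLoopA_go rest [] [p], List.nil_append, pvGo_pvH rest [p]]
    unfold collapse_semis_py_alt
    rw [pvFoldrB_pvH (p :: rest)]
    rcases h : PySem.Str.isIn "=" p with _ | _
    · rw [pvH_neg p rest h]
      simp
    · rw [pvH_pos p rest h]
      simp
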